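-- pv_equiv track=rewrite | github.com/dtunai/continual_learning_via_sparse_memory_finetuning | continual_learning_via_sparse_memory_finetuning/src/data/triviaqa_loader.py | _question_to_statement
-- ===== SOURCE A (Python) =====
-- def _question_to_statement(question: str, answer: str) -> str:
--     """convert q/a pair to statement."""
--     question = question.strip()
--     if question.endswith("?"):
--         question = question[:-1]
--
--     question_words = ["what", "who", "where", "when", "which", "how"]
--     lower_q = question.lower()
--     for qw in question_words:
--         if lower_q.startswith(qw + " is "):
--             question = question[len(qw) + 4 :]
--             return f"{question.capitalize()} is {answer}"
--         elif lower_q.startswith(qw + " was "):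
--             question = question[len(qw) + 5 :]
--             return f"{question.capitalize()} was {answer}"
--         elif lower_q.startswith(qw + " "):
--             question = question[len(qw) + 1 :]
--             return f"{question.capitalize()} is {answer}"
--
--     return f"{question}. {answer}"
-- ===== SOURCE B (Python) =====
-- def _question_to_statement(question: str, answer: str) -> str:
--     """convert q/a pair to statement."""
--     q = question.strip()
--     if q.endswith("?"):
--         q = q[:-1]
--     lower_q = q.lower()
--     idx = lower_q.find(" ")
--     if idx == -1:
--         return f"{q}. {answer}"
--     first = lower_q[:idx]
--     if first not in {"what", "who", "where", "when", "which", "how"}: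
--         return f"{q}. {answer}"
--     rest = lower_q[idx + 1:]
--     if rest.startswith("is "):
--         return f"{q[idx + 4:].capitalize()} is {answer}"
--     if rest.startswith("was "):
--         return f"{q[idx + 5:].capitalize()} was {answer}"
--     return f"{q[idx + 1:].capitalize()} is {answer}"
-- ===== Notes on version B (the rewrite author's own statement) =====
-- stated objective: simpler
-- what changed: Replaces A's loop over the six question words with three startswith tests each by a single parse of the first token (find the first space, one set-membership test, then branch on 'is '/'was '), so the prefix scanning disappears.
import Mathlib
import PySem

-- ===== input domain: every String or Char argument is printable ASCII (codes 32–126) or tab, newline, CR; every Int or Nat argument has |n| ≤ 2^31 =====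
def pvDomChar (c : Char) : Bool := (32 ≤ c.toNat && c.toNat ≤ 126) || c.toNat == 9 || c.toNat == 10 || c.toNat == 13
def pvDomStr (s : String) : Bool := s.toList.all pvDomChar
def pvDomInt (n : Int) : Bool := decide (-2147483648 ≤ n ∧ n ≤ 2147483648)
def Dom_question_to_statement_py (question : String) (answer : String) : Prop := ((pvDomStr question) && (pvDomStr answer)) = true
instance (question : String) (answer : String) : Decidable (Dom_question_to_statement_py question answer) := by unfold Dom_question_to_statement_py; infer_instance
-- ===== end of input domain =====

-- B replaces A's iterate-over-six-question-words loop with triple prefix tests by a direct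
-- parse of the first token (find the first space, test set membership once, then branch);
-- same outputs, simpler control shape.

-- Python str.capitalize(): first char uppercased, the rest lowercased (exact on ASCII; both
-- Python versions use .capitalize(), so both ports share this helper).
def pyCapitalize (s : String) : String :=
  match s.toList with
  | [] => ""
  | c :: cs => String.ofList (PySem.Chars.upperChar c :: cs.map PySem.Chars.lowerChar)

-- ===== PORT A =====
-- A's for-loop over the question words, with the three startswith tests in source order.
def loopA : List String → String → String → String → String
  | [], question, _, answer => question ++ ". " ++ answer
  | qw :: rest, question, lower_q, answer =>
    if PySem.Str.startswith lower_q (qw ++ " is ") then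
      pyCapitalize (PySem.Str.slice question (some ((PySem.Str.len qw : Int) + 4)) none) ++ " is " ++ answer
    else if PySem.Str.startswith lower_q (qw ++ " was ") then
      pyCapitalize (PySem.Str.slice question (some ((PySem.Str.len qw : Int) + 5)) none) ++ " was " ++ answer
    else if PySem.Str.startswith lower_q (qw ++ " ") then
      pyCapitalize (PySem.Str.slice question (some ((PySem.Str.len qw : Int) + 1)) none) ++ " is " ++ answer
    else loopA rest question lower_q answer

def question_to_statement_py (question : String) (answer : String) : String :=
  let q0 := PySem.Str.strip question
  let q1 := if PySem.Str.endswith q0 "?" then PySem.Str.slice q0 none (some (-1)) else q0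
  let lower_q := PySem.Str.lower q1
  loopA ["what", "who", "where", "when", "which", "how"] q1 lower_q answer

-- ===== PORT B =====
-- B's body after the shared strip / '?' removal / lower preprocessing.
def altCore (q : String) (lower_q : String) (answer : String) : String :=
  let idx := PySem.Str.find lower_q " "
  if idx == -1 then q ++ ". " ++ answer
  else
    let first := PySem.Str.slice lower_q none (some idx)
    if first ∈ ["what", "who", "where", "when", "which", "how"] then
      let rest := PySem.Str.slice lower_q (some (idx + 1)) none
      if PySem.Str.startswith rest "is " then
        pyCapitalize (PySem.Str.slice q (some (idx + 4)) none) ++ " is " ++ answer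
      else if PySem.Str.startswith rest "was " then
        pyCapitalize (PySem.Str.slice q (some (idx + 5)) none) ++ " was " ++ answer
      else
        pyCapitalize (PySem.Str.slice q (some (idx + 1)) none) ++ " is " ++ answer
    else q ++ ". " ++ answer

def question_to_statement_py_alt (question : String) (answer : String) : String :=
  let q0 := PySem.Str.strip question
  let q1 := if PySem.Str.endswith q0 "?" then PySem.Str.slice q0 none (some (-1)) else q0
  let lower_q := PySem.Str.lower q1
  altCore q1 lower_q answer

-- ===== PRECONDITION & SPEC =====
def Spec_question_to_statement_py (question : String) (answer : String) (out : String) : Prop := out = question_to_statement_py_alt question answer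
instance (question : String) (answer : String) (out : String) : Decidable (Spec_question_to_statement_py question answer out) := by unfold Spec_question_to_statement_py; infer_instance

-- ===== CLAIM (what is proved, stated in full; the proofs are below) =====
def Claim_equal_question_to_statement_py : Prop := ∀ (question : String) (answer : String), Dom_question_to_statement_py question answer → Spec_question_to_statement_py question answer (question_to_statement_py question answer)

-- ===== LEMMAS AND PROOFS =====

lemma tok_prefix (w : List Char) : ∀ (t : List Char) (p r : List Char), ' ' ∉ w → ' ' ∉ t →
    ((w ++ ' ' :: p) <+: (t ++ ' ' :: r) ↔ (w = t ∧ p <+: r)) := by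
  induction w with
  | nil =>
    intro t p r _ ht
    cases t with
    | nil => simp
    | cons c t' =>
      simp only [List.nil_append, List.cons_append, List.cons_prefix_cons]
      constructor
      · rintro ⟨h, _⟩; exact absurd (h ▸ List.mem_cons_self) ht
      · rintro ⟨h, _⟩; exact absurd h (by simp)
  | cons a w' ih =>
    intro t p r hw ht
    cases t with
    | nil =>
      simp only [List.cons_append, List.nil_append, List.cons_prefix_cons]
      constructor
      · rintro ⟨h, _⟩; exact absurd (h ▸ List.mem_cons_self) hw
      · rintro ⟨h, _⟩; exact absurd h (by simp)
    | cons c t' =>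
      simp only [List.cons_append, List.cons_prefix_cons]
      rw [ih t' p r (fun h => hw (List.mem_cons_of_mem _ h)) (fun h => ht (List.mem_cons_of_mem _ h))]
      constructor
      · rintro ⟨rfl, rfl, h⟩; exact ⟨rfl, h⟩
      · rintro ⟨h, hp⟩
        injection h with h1 h2
        exact ⟨h1, h2, hp⟩

lemma sw_tok (t r w p : List Char) (ht : ' ' ∉ t) (hw : ' ' ∉ w) :
    PySem.Chars.startswith (t ++ ' ' :: r) (w ++ ' ' :: p) = ((w == t) && PySem.Chars.startswith r p) := by
  rcases Bool.eq_false_or_eq_true ((w == t) && PySem.Chars.startswith r p) with h | h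
  swap
  · rw [h, ← Bool.not_eq_true, PySem.Chars.startswith_iff, tok_prefix w t p r hw ht]
    simp only [Bool.and_eq_false_iff, beq_eq_false_iff_ne, ne_eq] at h
    rcases h with h | h
    · rintro ⟨h1, _⟩; exact h h1
    · rintro ⟨_, h2⟩
      rw [← PySem.Chars.startswith_iff] at h2
      rw [h] at h2; exact Bool.false_ne_true h2
  · rw [h, PySem.Chars.startswith_iff, tok_prefix w t p r hw ht]
    simp only [Bool.and_eq_true, beq_iff_eq] at h
    exact ⟨h.1, (PySem.Chars.startswith_iff _ _).mp h.2⟩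

lemma sw_str (lower_q : String) (t r : List Char) (hlc : lower_q.toList = t ++ ' ' :: r)
    (ht : ' ' ∉ t) (pre : String) (w p : List Char) (hpre : pre.toList = w ++ ' ' :: p)
    (hw : ' ' ∉ w) :
    PySem.Str.startswith lower_q pre = ((w == t) && PySem.Chars.startswith r p) := by
  have : PySem.Str.startswith lower_q pre = PySem.Chars.startswith lower_q.toList pre.toList := by
    simp [PySem.Str.startswith]
  rw [this, hlc, hpre, sw_tok t r w p ht hw]

lemma mem_imp_space_prefix {l : List Char} {k : Nat} (h : ' ' ∈ l.take k) :
    ∃ i < k, [' '] <+: l.drop i := by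
  obtain ⟨i, hi, hget⟩ := List.getElem_of_mem h
  have hik : i < k := lt_of_lt_of_le hi (by simp [List.length_take])
  have hil : i < l.length := lt_of_lt_of_le hi (by simp [List.length_take])
  refine ⟨i, hik, ?_⟩
  have : l.drop i = l[i] :: l.drop (i + 1) := (List.getElem_cons_drop hil).symm
  rw [this, List.getElem_take] at *
  exact ⟨l.drop (i + 1), by rw [this, hget]; rfl⟩

lemma no_space_sw (lower_q : String) (h : ¬ (' ' ∈ lower_q.toList)) (pre : String)
    (hp : ' ' ∈ pre.toList) : PySem.Str.startswith lower_q pre = false := by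
  rw [← Bool.not_eq_true]
  intro hsw
  have : PySem.Chars.startswith lower_q.toList pre.toList = true := by
    simpa [PySem.Str.startswith] using hsw
  exact h (((PySem.Chars.startswith_iff _ _).mp this).subset hp)

lemma core (q lower_q answer : String) :
    loopA ["what", "who", "where", "when", "which", "how"] q lower_q answer = altCore q lower_q answer := by
  have hfind : PySem.Str.find lower_q " " = PySem.Chars.find lower_q.toList [' '] := by
    simp [PySem.Str.find]
  have hneg1 := PySem.Chars.neg_one_le_find lower_q.toList [' ']
  by_cases hneg : PySem.Chars.find lower_q.toList [' '] = -1
  · -- no space in lower_q: both sides fall through to the fallback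
    have hnomem : ' ' ∉ lower_q.toList := by
      intro hm
      obtain ⟨s1, s2, hsp⟩ := List.append_of_mem hm
      exact (PySem.Chars.find_eq_neg_one_iff _ _).mp hneg ⟨s1, s2, by rw [hsp]; simp⟩
    have f_what_is : PySem.Str.startswith lower_q ("what" ++ " is ") = false := no_space_sw lower_q hnomem _ (by decide)
    have f_what_was : PySem.Str.startswith lower_q ("what" ++ " was ") = false := no_space_sw lower_q hnomem _ (by decide)
    have f_what_sp : PySem.Str.startswith lower_q ("what" ++ " ") = false := no_space_sw lower_q hnomem _ (by decide)
    have f_who_is : PySem.Str.startswith lower_q ("who" ++ " is ") = false := no_space_sw lower_q hnomem _ (by decide)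
    have f_who_was : PySem.Str.startswith lower_q ("who" ++ " was ") = false := no_space_sw lower_q hnomem _ (by decide)
    have f_who_sp : PySem.Str.startswith lower_q ("who" ++ " ") = false := no_space_sw lower_q hnomem _ (by decide)
    have f_where_is : PySem.Str.startswith lower_q ("where" ++ " is ") = false := no_space_sw lower_q hnomem _ (by decide)
    have f_where_was : PySem.Str.startswith lower_q ("where" ++ " was ") = false := no_space_sw lower_q hnomem _ (by decide)
    have f_where_sp : PySem.Str.startswith lower_q ("where" ++ " ") = false := no_space_sw lower_q hnomem _ (by decide)
    have f_when_is : PySem.Str.startswith lower_q ("when" ++ " is ") = false := no_space_sw lower_q hnomem _ (by decide)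
    have f_when_was : PySem.Str.startswith lower_q ("when" ++ " was ") = false := no_space_sw lower_q hnomem _ (by decide)
    have f_when_sp : PySem.Str.startswith lower_q ("when" ++ " ") = false := no_space_sw lower_q hnomem _ (by decide)
    have f_which_is : PySem.Str.startswith lower_q ("which" ++ " is ") = false := no_space_sw lower_q hnomem _ (by decide)
    have f_which_was : PySem.Str.startswith lower_q ("which" ++ " was ") = false := no_space_sw lower_q hnomem _ (by decide)
    have f_which_sp : PySem.Str.startswith lower_q ("which" ++ " ") = false := no_space_sw lower_q hnomem _ (by decide)
    have f_how_is : PySem.Str.startswith lower_q ("how" ++ " is ") = false := no_space_sw lower_q hnomem _ (by decide)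
    have f_how_was : PySem.Str.startswith lower_q ("how" ++ " was ") = false := no_space_sw lower_q hnomem _ (by decide)
    have f_how_sp : PySem.Str.startswith lower_q ("how" ++ " ") = false := no_space_sw lower_q hnomem _ (by decide)
    simp only [altCore, loopA, hfind, hneg, f_what_is, f_what_was, f_what_sp, f_who_is, f_who_was, f_who_sp, f_where_is, f_where_was, f_where_sp, f_when_is, f_when_was, f_when_sp, f_which_is, f_which_was, f_which_sp, f_how_is, f_how_was, f_how_sp]
    simp
  · have h0 : 0 ≤ PySem.Chars.find lower_q.toList [' '] := by omega
    obtain ⟨hpref, hmin⟩ := PySem.Chars.find_spec h0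
    set k := (PySem.Chars.find lower_q.toList [' ']).toNat with hkdef
    obtain ⟨r, hr⟩ : ∃ r, lower_q.toList.drop k = ' ' :: r := by
      rcases hpref with ⟨u, hu⟩; exact ⟨u, hu.symm⟩
    have ht : ' ' ∉ lower_q.toList.take k := by
      intro hm
      obtain ⟨i, hik, hip⟩ := mem_imp_space_prefix hm
      exact hmin i hik hip
    have hlc : lower_q.toList = lower_q.toList.take k ++ ' ' :: r := by
      conv_lhs => rw [← List.take_append_drop k lower_q.toList]
      rw [hr]
    set t := lower_q.toList.take k with htdef
    have hklen : k < lower_q.toList.length := by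
      by_contra hcon
      push_neg at hcon
      rw [List.drop_eq_nil_of_le hcon] at hr
      cases hr
    have htlen : t.length = k := by
      rw [htdef, List.length_take]
      omega
    have hkn : ((k : Nat) : Int) = PySem.Chars.find lower_q.toList [' '] := Int.toNat_of_nonneg h0
    have e_what_is : PySem.Str.startswith lower_q ("what" ++ " is ") = (("what".toList == t) && PySem.Chars.startswith r ("is ").toList) := sw_str lower_q t r hlc ht _ "what".toList ("is ").toList (by decide) (by decide)
    have e_what_was : PySem.Str.startswith lower_q ("what" ++ " was ") = (("what".toList == t) && PySem.Chars.startswith r ("was ").toList) := sw_str lower_q t r hlc ht _ "what".toList ("was ").toList (by decide) (by decide)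
    have e_what_sp : PySem.Str.startswith lower_q ("what" ++ " ") = (("what".toList == t) && PySem.Chars.startswith r (("" : String)).toList) := sw_str lower_q t r hlc ht _ "what".toList (("" : String)).toList (by decide) (by decide)
    have e_who_is : PySem.Str.startswith lower_q ("who" ++ " is ") = (("who".toList == t) && PySem.Chars.startswith r ("is ").toList) := sw_str lower_q t r hlc ht _ "who".toList ("is ").toList (by decide) (by decide)
    have e_who_was : PySem.Str.startswith lower_q ("who" ++ " was ") = (("who".toList == t) && PySem.Chars.startswith r ("was ").toList) := sw_str lower_q t r hlc ht _ "who".toList ("was ").toList (by decide) (by decide)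
    have e_who_sp : PySem.Str.startswith lower_q ("who" ++ " ") = (("who".toList == t) && PySem.Chars.startswith r (("" : String)).toList) := sw_str lower_q t r hlc ht _ "who".toList (("" : String)).toList (by decide) (by decide)
    have e_where_is : PySem.Str.startswith lower_q ("where" ++ " is ") = (("where".toList == t) && PySem.Chars.startswith r ("is ").toList) := sw_str lower_q t r hlc ht _ "where".toList ("is ").toList (by decide) (by decide)
    have e_where_was : PySem.Str.startswith lower_q ("where" ++ " was ") = (("where".toList == t) && PySem.Chars.startswith r ("was ").toList) := sw_str lower_q t r hlc ht _ "where".toList ("was ").toList (by decide) (by decide)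
    have e_where_sp : PySem.Str.startswith lower_q ("where" ++ " ") = (("where".toList == t) && PySem.Chars.startswith r (("" : String)).toList) := sw_str lower_q t r hlc ht _ "where".toList (("" : String)).toList (by decide) (by decide)
    have e_when_is : PySem.Str.startswith lower_q ("when" ++ " is ") = (("when".toList == t) && PySem.Chars.startswith r ("is ").toList) := sw_str lower_q t r hlc ht _ "when".toList ("is ").toList (by decide) (by decide)
    have e_when_was : PySem.Str.startswith lower_q ("when" ++ " was ") = (("when".toList == t) && PySem.Chars.startswith r ("was ").toList) := sw_str lower_q t r hlc ht _ "when".toList ("was ").toList (by decide) (by decide)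
    have e_when_sp : PySem.Str.startswith lower_q ("when" ++ " ") = (("when".toList == t) && PySem.Chars.startswith r (("" : String)).toList) := sw_str lower_q t r hlc ht _ "when".toList (("" : String)).toList (by decide) (by decide)
    have e_which_is : PySem.Str.startswith lower_q ("which" ++ " is ") = (("which".toList == t) && PySem.Chars.startswith r ("is ").toList) := sw_str lower_q t r hlc ht _ "which".toList ("is ").toList (by decide) (by decide)
    have e_which_was : PySem.Str.startswith lower_q ("which" ++ " was ") = (("which".toList == t) && PySem.Chars.startswith r ("was ").toList) := sw_str lower_q t r hlc ht _ "which".toList ("was ").toList (by decide) (by decide)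
    have e_which_sp : PySem.Str.startswith lower_q ("which" ++ " ") = (("which".toList == t) && PySem.Chars.startswith r (("" : String)).toList) := sw_str lower_q t r hlc ht _ "which".toList (("" : String)).toList (by decide) (by decide)
    have e_how_is : PySem.Str.startswith lower_q ("how" ++ " is ") = (("how".toList == t) && PySem.Chars.startswith r ("is ").toList) := sw_str lower_q t r hlc ht _ "how".toList ("is ").toList (by decide) (by decide)
    have e_how_was : PySem.Str.startswith lower_q ("how" ++ " was ") = (("how".toList == t) && PySem.Chars.startswith r ("was ").toList) := sw_str lower_q t r hlc ht _ "how".toList ("was ").toList (by decide) (by decide)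
    have e_how_sp : PySem.Str.startswith lower_q ("how" ++ " ") = (("how".toList == t) && PySem.Chars.startswith r (("" : String)).toList) := sw_str lower_q t r hlc ht _ "how".toList (("" : String)).toList (by decide) (by decide)
    have hfirstS : PySem.Str.slice lower_q none (some (PySem.Str.find lower_q " ")) = String.ofList t := by
      apply String.toList_inj.mp
      rw [hfind, ← hkn]
      simp [PySem.List.slice_to_natCast, htdef]
    have hrestL : (PySem.Str.slice lower_q (some (PySem.Str.find lower_q " " + 1)) none).toList = r := by
      rw [hfind, ← hkn]
      have hcast : ((k : Int) + 1) = ((k + 1 : Nat) : Int) := by push_cast; ring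
      rw [hcast]
      simp only [PySem.Str.slice, PySem.Chars.slice_eq_listSlice, PySem.List.slice_from_natCast]
      have : lower_q.toList.drop (k + 1) = (lower_q.toList.drop k).drop 1 := by
        rw [List.drop_drop]
      rw [this, hr]
      simp
    have hsw_is : PySem.Str.startswith (PySem.Str.slice lower_q (some (PySem.Str.find lower_q " " + 1)) none) "is " = PySem.Chars.startswith r "is ".toList := by
      simp only [PySem.Str.startswith]
      rw [hrestL]
    have hsw_was : PySem.Str.startswith (PySem.Str.slice lower_q (some (PySem.Str.find lower_q " " + 1)) none) "was " = PySem.Chars.startswith r "was ".toList := by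
      simp only [PySem.Str.startswith]
      rw [hrestL]
    have hne1 : (PySem.Str.find lower_q " " == -1) = false := by
      rw [hfind]; simp; omega
    have hnil : PySem.Chars.startswith r [] = true := (PySem.Chars.startswith_iff _ _).mpr List.nil_prefix
    clear_value t
    clear_value k
    by_cases hc0 : t = "what".toList
    · subst hc0
      have hk4 : k = 4 := by
        have hlen : ("what".toList).length = 4 := by decide
        omega
      subst hk4
      have hlen' : ((PySem.Str.len "what" : Int)) = ((4 : Nat) : Int) := by decide
      have hfn : PySem.Str.find lower_q " " = ((4 : Nat) : Int) := by rw [hfind, ← hkn]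
      simp only [altCore, hne1, hfirstS, hsw_is, hsw_was]
      simp only [loopA, e_what_is, e_what_was, e_what_sp, e_who_is, e_who_was, e_who_sp, e_where_is, e_where_was, e_where_sp, e_when_is, e_when_was, e_when_sp, e_which_is, e_which_was, e_which_sp, e_how_is, e_how_was, e_how_sp]
      simp only [hfn, hlen']
      simp [hnil]
    by_cases hc1 : t = "who".toList
    · subst hc1
      have hk4 : k = 3 := by
        have hlen : ("who".toList).length = 3 := by decide
        omega
      subst hk4
      have hlen' : ((PySem.Str.len "who" : Int)) = ((3 : Nat) : Int) := by decide
      have hfn : PySem.Str.find lower_q " " = ((3 : Nat) : Int) := by rw [hfind, ← hkn]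
      simp only [altCore, hne1, hfirstS, hsw_is, hsw_was]
      simp only [loopA, e_what_is, e_what_was, e_what_sp, e_who_is, e_who_was, e_who_sp, e_where_is, e_where_was, e_where_sp, e_when_is, e_when_was, e_when_sp, e_which_is, e_which_was, e_which_sp, e_how_is, e_how_was, e_how_sp]
      simp only [hfn, hlen']
      simp [hnil]
    by_cases hc2 : t = "where".toList
    · subst hc2
      have hk4 : k = 5 := by
        have hlen : ("where".toList).length = 5 := by decide
        omega
      subst hk4
      have hlen' : ((PySem.Str.len "where" : Int)) = ((5 : Nat) : Int) := by decide
      have hfn : PySem.Str.find lower_q " " = ((5 : Nat) : Int) := by rw [hfind, ← hkn]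
      simp only [altCore, hne1, hfirstS, hsw_is, hsw_was]
      simp only [loopA, e_what_is, e_what_was, e_what_sp, e_who_is, e_who_was, e_who_sp, e_where_is, e_where_was, e_where_sp, e_when_is, e_when_was, e_when_sp, e_which_is, e_which_was, e_which_sp, e_how_is, e_how_was, e_how_sp]
      simp only [hfn, hlen']
      simp [hnil]
    by_cases hc3 : t = "when".toList
    · subst hc3
      have hk4 : k = 4 := by
        have hlen : ("when".toList).length = 4 := by decide
        omega
      subst hk4
      have hlen' : ((PySem.Str.len "when" : Int)) = ((4 : Nat) : Int) := by decide
      have hfn : PySem.Str.find lower_q " " = ((4 : Nat) : Int) := by rw [hfind, ← hkn]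
      simp only [altCore, hne1, hfirstS, hsw_is, hsw_was]
      simp only [loopA, e_what_is, e_what_was, e_what_sp, e_who_is, e_who_was, e_who_sp, e_where_is, e_where_was, e_where_sp, e_when_is, e_when_was, e_when_sp, e_which_is, e_which_was, e_which_sp, e_how_is, e_how_was, e_how_sp]
      simp only [hfn, hlen']
      simp [hnil]
    by_cases hc4 : t = "which".toList
    · subst hc4
      have hk4 : k = 5 := by
        have hlen : ("which".toList).length = 5 := by decide
        omega
      subst hk4
      have hlen' : ((PySem.Str.len "which" : Int)) = ((5 : Nat) : Int) := by decide
      have hfn : PySem.Str.find lower_q " " = ((5 : Nat) : Int) := by rw [hfind, ← hkn]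
      simp only [altCore, hne1, hfirstS, hsw_is, hsw_was]
      simp only [loopA, e_what_is, e_what_was, e_what_sp, e_who_is, e_who_was, e_who_sp, e_where_is, e_where_was, e_where_sp, e_when_is, e_when_was, e_when_sp, e_which_is, e_which_was, e_which_sp, e_how_is, e_how_was, e_how_sp]
      simp only [hfn, hlen']
      simp [hnil]
    by_cases hc5 : t = "how".toList
    · subst hc5
      have hk4 : k = 3 := by
        have hlen : ("how".toList).length = 3 := by decide
        omega
      subst hk4
      have hlen' : ((PySem.Str.len "how" : Int)) = ((3 : Nat) : Int) := by decide
      have hfn : PySem.Str.find lower_q " " = ((3 : Nat) : Int) := by rw [hfind, ← hkn]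
      simp only [altCore, hne1, hfirstS, hsw_is, hsw_was]
      simp only [loopA, e_what_is, e_what_was, e_what_sp, e_who_is, e_who_was, e_who_sp, e_where_is, e_where_was, e_where_sp, e_when_is, e_when_was, e_when_sp, e_which_is, e_which_was, e_which_sp, e_how_is, e_how_was, e_how_sp]
      simp only [hfn, hlen']
      simp [hnil]
    -- t is none of the six question words: every loop test is false and B's membership test fails
    have hb0 : (("what".toList : List Char) == t) = false := by rw [beq_eq_false_iff_ne]; exact fun h => hc0 h.symm
    have hb1 : (("who".toList : List Char) == t) = false := by rw [beq_eq_false_iff_ne]; exact fun h => hc1 h.symm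
    have hb2 : (("where".toList : List Char) == t) = false := by rw [beq_eq_false_iff_ne]; exact fun h => hc2 h.symm
    have hb3 : (("when".toList : List Char) == t) = false := by rw [beq_eq_false_iff_ne]; exact fun h => hc3 h.symm
    have hb4 : (("which".toList : List Char) == t) = false := by rw [beq_eq_false_iff_ne]; exact fun h => hc4 h.symm
    have hb5 : (("how".toList : List Char) == t) = false := by rw [beq_eq_false_iff_ne]; exact fun h => hc5 h.symm
    have hmemf : (String.ofList t ∈ (["what", "who", "where", "when", "which", "how"] : List String)) = False := by
      simp only [List.mem_cons, List.not_mem_nil, eq_iff_iff, iff_false, or_false]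
      push_neg
      refine ⟨?_, ?_, ?_, ?_, ?_, ?_⟩ <;> intro h <;>
        first
        | exact hc0 (by rw [← h]; simp)
        | exact hc1 (by rw [← h]; simp)
        | exact hc2 (by rw [← h]; simp)
        | exact hc3 (by rw [← h]; simp)
        | exact hc4 (by rw [← h]; simp)
        | exact hc5 (by rw [← h]; simp)
    simp only [altCore, hne1, hfirstS, hmemf]
    simp only [loopA, e_what_is, e_what_was, e_what_sp, e_who_is, e_who_was, e_who_sp, e_where_is, e_where_was, e_where_sp, e_when_is, e_when_was, e_when_sp, e_which_is, e_which_was, e_which_sp, e_how_is, e_how_was, e_how_sp, hb0, hb1, hb2, hb3, hb4, hb5]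
    simp

-- ===== VERDICT (by name: the statement is the Claim_ definition above) =====
theorem question_to_statement_py_spec : Claim_equal_question_to_statement_py := by
  intro question answer _
  show question_to_statement_py question answer = question_to_statement_py_alt question answer
  unfold question_to_statement_py question_to_statement_py_alt
  exact core _ _ answer
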